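-- pv_equiv track=rewrite | github.com/Fhlpmah/geometry_generator | back_end/block_generation.py | check_gravity_on_ground
-- ===== SOURCE A (Python) =====
-- def check_gravity_on_ground(final_coords):
--     comfort_on_ground = 0
--     opaque_violation = False
--     for _, (x, y, z, dx, dy, dz, type) in final_coords.items():
--         if z == 1:
--             if type == 'Comfort': comfort_on_ground += 1
--         if type == 'Opaque' and z > 1: opaque_violation = True
--     return comfort_on_ground >= 2, not opaque_violation
-- ===== SOURCE B (Python) =====
-- def check_gravity_on_ground(final_coords):
--     # Stage 1: bucket the z-coordinates of the blocks by their type.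
--     by_type = {}
--     for (x, y, z, dx, dy, dz, t) in final_coords.values():
--         by_type.setdefault(t, []).append(z)
--     # Stage 2: judge from the two relevant buckets.
--     comfort_on_ground = by_type.get('Comfort', []).count(1)
--     opaque_ok = all(z <= 1 for z in by_type.get('Opaque', []))
--     return comfort_on_ground >= 2, opaque_ok
-- ===== Notes on version B (the rewrite author's own statement) =====
-- stated objective: alternative
-- what changed: Replaces A's fused loop carrying a counter and a violation flag by a group-by: one pass buckets each block's z by its type into a dict, then the two answers are read off the 'Comfort' bucket (count of z==1) and the 'Opaque' bucket (all z<=1).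
import Mathlib
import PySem

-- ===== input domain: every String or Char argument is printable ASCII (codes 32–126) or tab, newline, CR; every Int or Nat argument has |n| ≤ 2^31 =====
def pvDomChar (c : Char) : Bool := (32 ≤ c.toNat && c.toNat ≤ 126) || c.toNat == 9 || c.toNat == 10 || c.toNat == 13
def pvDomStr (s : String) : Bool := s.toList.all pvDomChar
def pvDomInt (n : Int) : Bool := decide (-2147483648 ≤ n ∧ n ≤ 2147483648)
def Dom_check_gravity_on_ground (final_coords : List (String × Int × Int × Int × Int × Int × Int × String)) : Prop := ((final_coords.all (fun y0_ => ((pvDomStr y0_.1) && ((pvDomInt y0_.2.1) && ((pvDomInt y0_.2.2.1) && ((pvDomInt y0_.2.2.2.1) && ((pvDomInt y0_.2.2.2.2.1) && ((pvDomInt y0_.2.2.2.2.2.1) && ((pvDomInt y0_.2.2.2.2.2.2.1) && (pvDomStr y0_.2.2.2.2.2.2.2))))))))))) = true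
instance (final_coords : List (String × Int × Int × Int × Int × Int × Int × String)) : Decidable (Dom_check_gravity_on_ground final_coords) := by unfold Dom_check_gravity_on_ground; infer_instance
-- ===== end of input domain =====

-- B replaces A's fused counter+flag loop by a group-by-type bucketing pass followed by two bucket queries (alternative decomposition, same cost).


-- ===== PORT A =====
-- A: one fused loop over the dict items, accumulating the comfort counter and the opaque-violation flag.
def check_gravity_on_ground (final_coords : List (String × Int × Int × Int × Int × Int × Int × String)) : Bool × Bool :=
  let s := final_coords.foldl (fun (st : Int × Bool) p =>
    let (_, _x, _y, z, _dx, _dy, _dz, ty) := p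
    let c := if z = 1 then (if ty = "Comfort" then st.1 + 1 else st.1) else st.1
    let v := if ty = "Opaque" ∧ z > 1 then true else st.2
    (c, v)) (0, false)
  (decide (s.1 ≥ 2), !s.2)

-- ===== PORT B =====
-- B: bucket each block's z by its type (setdefault/append = Dict.modify with ++ [z]), then read both answers off the buckets.
def check_gravity_on_ground_alt (final_coords : List (String × Int × Int × Int × Int × Int × Int × String)) : Bool × Bool :=
  let by_type : PySem.Dict String (List Int) :=
    final_coords.foldl (fun d p => d.modify p.2.2.2.2.2.2.2 [] (· ++ [p.2.2.2.1])) PySem.Dict.empty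
  let comfort_on_ground : Nat := (by_type.getD "Comfort" []).count 1
  let opaque_ok : Bool := (by_type.getD "Opaque" []).all (fun z => decide (z ≤ 1))
  (decide (comfort_on_ground ≥ 2), opaque_ok)

-- ===== PRECONDITION & SPEC =====
def Spec_check_gravity_on_ground (final_coords : List (String × Int × Int × Int × Int × Int × Int × String)) (out : Bool × Bool) : Prop := out = check_gravity_on_ground_alt final_coords
instance (final_coords : List (String × Int × Int × Int × Int × Int × Int × String)) (out : Bool × Bool) : Decidable (Spec_check_gravity_on_ground final_coords out) := by unfold Spec_check_gravity_on_ground; infer_instance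

-- ===== CLAIM (what is proved, stated in full; the proofs are below) =====
def Claim_equal_check_gravity_on_ground : Prop := ∀ (final_coords : List (String × Int × Int × Int × Int × Int × Int × String)), Dom_check_gravity_on_ground final_coords → Spec_check_gravity_on_ground final_coords (check_gravity_on_ground final_coords)

-- ===== LEMMAS AND PROOFS =====
-- A's fold computes the full comfort count and the opaque-violation flag.
lemma cg_fold_inv (l : List (String × Int × Int × Int × Int × Int × Int × String)) :
    ∀ (c : Int) (v : Bool),
    l.foldl (fun (st : Int × Bool) p =>
      let (_, _x, _y, z, _dx, _dy, _dz, ty) := p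
      let c := if z = 1 then (if ty = "Comfort" then st.1 + 1 else st.1) else st.1
      let v := if ty = "Opaque" ∧ z > 1 then true else st.2
      (c, v)) (c, v)
    = (c + (l.countP (fun p => decide (p.2.2.2.1 = 1 ∧ p.2.2.2.2.2.2.2 = "Comfort")) : Nat),
       v || l.any (fun p => decide (p.2.2.2.2.2.2.2 = "Opaque" ∧ p.2.2.2.1 > 1))) := by
  induction l with
  | nil => intro c v; simp
  | cons h t ih =>
    intro c v
    obtain ⟨n, x, y, z, dx, dy, dz, ty⟩ := h
    simp only [List.foldl_cons, List.countP_cons, List.any_cons]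
    rw [ih]
    by_cases hz : z = 1 <;> by_cases hc : ty = "Comfort" <;>
      by_cases ho : (ty = "Opaque" ∧ z > 1) <;>
      simp [hz, hc, ho] <;> push_cast <;> ring

-- The bucket of type c holds exactly the z-coordinates of the blocks of type c, in order.
lemma cg_bucket (l : List (String × Int × Int × Int × Int × Int × Int × String)) (c : String) :
    (l.foldl (fun d p => d.modify p.2.2.2.2.2.2.2 [] (· ++ [p.2.2.2.1])) PySem.Dict.empty).getD c []
    = (l.filter (fun p => p.2.2.2.2.2.2.2 == c)).map (fun p => p.2.2.2.1) := by
  have h := PySem.Dict.getD_foldl_modify_append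
    (l := l.map (fun p => (p.2.2.2.2.2.2.2, p.2.2.2.1))) (d := PySem.Dict.empty) (c := c)
  rw [List.foldl_map] at h
  simpa [List.filter_map, List.map_map, Function.comp_def] using h

-- ===== VERDICT (by name: the statement is the Claim_ definition above) =====
theorem check_gravity_on_ground_spec : Claim_equal_check_gravity_on_ground := by
  intro fc _
  unfold Spec_check_gravity_on_ground check_gravity_on_ground check_gravity_on_ground_alt
  rw [cg_fold_inv]
  dsimp only
  rw [cg_bucket, cg_bucket]
  simp only [List.count_eq_countP, List.countP_map, List.countP_filter, Function.comp_def]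
  refine Prod.ext ?_ ?_
  · simp only [zero_add]
    have hc : List.countP (fun p : String × Int × Int × Int × Int × Int × Int × String => decide (p.2.2.2.1 = 1 ∧ p.2.2.2.2.2.2.2 = "Comfort")) fc
        = List.countP (fun a : String × Int × Int × Int × Int × Int × Int × String => a.2.2.2.1 == 1 && a.2.2.2.2.2.2.2 == "Comfort") fc := by
      apply List.countP_congr; intro p _; simp [beq_iff_eq]
    rw [hc, decide_eq_decide]
    omega
  · simp only [Bool.false_or, List.all_eq_not_any_not]
    apply congrArg
    rw [List.any_map, List.any_filter]
    refine List.any_congr rfl fun p => ?_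
    by_cases h : p.2.2.2.2.2.2.2 = "Opaque" <;>
      simp only [h, Function.comp_def, decide_eq_true_eq, beq_iff_eq, beq_self_eq_true,
        Bool.true_and, Bool.false_and, if_true, if_false, decide_true, decide_false] <;>
      simp [h] <;> first | rfl | (rw [← decide_not, decide_eq_decide]; omega)
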